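-- pv_equiv track=rewrite | github.com/Abhishek09821/Youtube-Video-Downloader | server.py | _build_caption_map
-- ===== SOURCE A (Python) =====
-- def _pick_best_fmt(fmt_list):
--     if not fmt_list:
--         return None
--     for pref in ("json3", "vtt", "srv3", "srv2", "srv1"):
--         for f in fmt_list:
--             if f.get("ext") == pref and f.get("url"):
--                 return f
--     for f in fmt_list:
--         if f.get("url"):
--             return f
--     return None
--
-- def _build_caption_map(info):
--     """
--     Build a flat map of {lang_code: {url, kind}} from yt-dlp info.
--     Covers manual + auto-generated for all languages.
--     """
--     cap_map = {}
--     manual = info.get("subtitles") or {}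
--     auto   = info.get("automatic_captions") or {}
--
--     for lang, fmts in manual.items():
--         entry = _pick_best_fmt(fmts)
--         if entry and entry.get("url"):
--             cap_map[lang] = {"url": entry["url"], "kind": "manual"}
--
--     for lang, fmts in auto.items():
--         if lang not in cap_map:  # manual takes priority
--             entry = _pick_best_fmt(fmts)
--             if entry and entry.get("url"):
--                 cap_map[lang] = {"url": entry["url"], "kind": "auto"}
--
--     return cap_map
-- ===== SOURCE B (Python) =====
-- # B: single-pass best-format selection via a rank table, and one unified
-- # (kind, table) loop instead of two near-identical loops.
--
-- _RANK = {"json3": 0, "vtt": 1, "srv3": 2, "srv2": 3, "srv1": 4}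
--
-- def _pick_best_fmt(fmt_list):
--     best = None
--     best_rank = 6
--     for f in fmt_list:
--         if not f.get("url"):
--             continue
--         r = _RANK.get(f.get("ext"), 5)
--         if r < best_rank:
--             best, best_rank = f, r
--     return best
--
-- def _build_caption_map(info):
--     cap_map = {}
--     for kind, table in (("manual", info.get("subtitles") or {}),
--                         ("auto", info.get("automatic_captions") or {})):
--         for lang, fmts in table.items():
--             if lang in cap_map:
--                 continue
--             entry = _pick_best_fmt(fmts)
--             if entry is not None:
--                 cap_map[lang] = {"url": entry["url"], "kind": kind}
--     return cap_map
-- ===== Notes on version B (the rewrite author's own statement) =====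
-- stated objective: simpler
-- what changed: _pick_best_fmt's three sequential scans (5 preference passes plus a fallback pass) are replaced by one single pass tracking the format with the strictly smallest rank from a rank table, and _build_caption_map's two near-identical loops are merged into one loop over (kind, table) pairs with a 'lang already mapped' skip.
import Mathlib
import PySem

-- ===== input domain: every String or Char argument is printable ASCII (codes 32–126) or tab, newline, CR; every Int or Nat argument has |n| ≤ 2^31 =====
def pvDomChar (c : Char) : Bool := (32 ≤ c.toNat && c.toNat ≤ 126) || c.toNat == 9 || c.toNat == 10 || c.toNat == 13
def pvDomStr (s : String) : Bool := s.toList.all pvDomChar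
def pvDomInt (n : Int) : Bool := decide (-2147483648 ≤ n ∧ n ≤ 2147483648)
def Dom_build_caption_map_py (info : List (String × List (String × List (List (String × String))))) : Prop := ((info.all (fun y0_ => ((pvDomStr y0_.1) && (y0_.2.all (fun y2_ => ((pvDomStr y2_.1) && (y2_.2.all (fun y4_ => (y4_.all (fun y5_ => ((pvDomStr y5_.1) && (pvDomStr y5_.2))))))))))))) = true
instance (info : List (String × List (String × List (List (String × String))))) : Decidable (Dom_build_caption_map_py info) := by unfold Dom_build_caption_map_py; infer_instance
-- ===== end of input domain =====

-- B replaces _pick_best_fmt's three sequential scans by one single pass over a rank table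
-- and merges _build_caption_map's two loops into one loop over (kind, table) pairs (objective: simpler).


-- shared primitives: `f.get(k)` on a fmt dict, Python truthiness of `f.get("url")`,
-- and the result dict literal {"url": …, "kind": kind} (both Pythons build these the same way)
def pvFGet (f : List (String × String)) (k : String) : Option String := (PySem.Dict.mk f).get? k
def pvTruthy (f : List (String × String)) : Bool := (pvFGet f "url").getD "" != ""
def pvCapEntry (kind : String) (entry : List (String × String)) : List (String × String) :=
  [("url", (pvFGet entry "url").getD ""), ("kind", kind)]

-- ===== PORT A =====
def pick_best_fmt (fmt_list : List (List (String × String))) : Option (List (String × String)) :=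
  if fmt_list.isEmpty then none
  else
    match (["json3", "vtt", "srv3", "srv2", "srv1"].findSome?
        (fun pref => fmt_list.find? (fun f => (pvFGet f "ext" == some pref) && pvTruthy f))) with
    | some f => some f
    | none => fmt_list.find? (fun f => pvTruthy f)

def build_caption_map_py (info : List (String × List (String × List (List (String × String))))) : List (String × List (String × String)) :=
  let manual := ((PySem.Dict.mk info).get? "subtitles").getD []
  let auto := ((PySem.Dict.mk info).get? "automatic_captions").getD []
  let cap1 := manual.foldl (fun cap p =>
      match pick_best_fmt p.2 with
      | some entry => if !entry.isEmpty && pvTruthy entry then cap.insert p.1 (pvCapEntry "manual" entry) else cap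
      | none => cap) (PySem.Dict.empty)
  let cap2 := auto.foldl (fun cap p =>
      if cap.contains p.1 then cap
      else match pick_best_fmt p.2 with
        | some entry => if !entry.isEmpty && pvTruthy entry then cap.insert p.1 (pvCapEntry "auto" entry) else cap
        | none => cap) cap1
  cap2.items

-- ===== PORT B =====
def pvRankTbl : List (String × Int) := [("json3", 0), ("vtt", 1), ("srv3", 2), ("srv2", 3), ("srv1", 4)]
def pvRank (f : List (String × String)) : Int :=
  match pvFGet f "ext" with
  | none => 5
  | some e => ((PySem.Dict.mk pvRankTbl).get? e).getD 5

def pick_best_fmt_alt (fmt_list : List (List (String × String))) : Option (List (String × String)) :=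
  (fmt_list.foldl (fun st f =>
      if !pvTruthy f then st
      else if pvRank f < st.2 then (some f, pvRank f) else st)
    ((none : Option (List (String × String))), (6 : Int))).1

def build_caption_map_py_alt (info : List (String × List (String × List (List (String × String))))) : List (String × List (String × String)) :=
  ([("manual", ((PySem.Dict.mk info).get? "subtitles").getD []),
    ("auto", ((PySem.Dict.mk info).get? "automatic_captions").getD [])].foldl
    (fun cap kt => kt.2.foldl (fun cap p =>
        if cap.contains p.1 then cap
        else match pick_best_fmt_alt p.2 with
          | some entry => cap.insert p.1 (pvCapEntry kt.1 entry)
          | none => cap) cap)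
    (PySem.Dict.empty : PySem.Dict String (List (String × String)))).items

-- ===== PRECONDITION & SPEC =====
-- Pre_ only states the dict invariant of the assoc-list encoding: the "subtitles" table has
-- distinct language keys. Every Python dict satisfies it, so no Python-representable input is
-- excluded; on duplicate-key lists A's port overwrites while B's keeps the first entry.
def Pre_build_caption_map_py (info : List (String × List (String × List (List (String × String))))) : Prop :=
  (((((PySem.Dict.mk info).get? "subtitles").getD []).map Prod.fst).Nodup)
instance (info : List (String × List (String × List (List (String × String))))) : Decidable (Pre_build_caption_map_py info) := by unfold Pre_build_caption_map_py; infer_instance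
def pvWitness_build_caption_map_py : (List (String × List (String × List (List (String × String))))) :=
  [("subtitles", [("en", [[("ext", "vtt"), ("url", "u")]])]),
   ("automatic_captions", [("de", [[("url", "v")]])])]
def Spec_build_caption_map_py (info : List (String × List (String × List (List (String × String))))) (out : List (String × List (String × String))) : Prop := out = build_caption_map_py_alt info
instance (info : List (String × List (String × List (List (String × String))))) (out : List (String × List (String × String))) : Decidable (Spec_build_caption_map_py info out) := by unfold Spec_build_caption_map_py; infer_instance

-- ===== CLAIM (what is proved, stated in full; the proofs are below) =====
def Claim_equal_build_caption_map_py : Prop := ∀ (info : List (String × List (String × List (List (String × String))))), Dom_build_caption_map_py info → Pre_build_caption_map_py info → Spec_build_caption_map_py info (build_caption_map_py info)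

-- ===== LEMMAS AND PROOFS =====

-- the i-th selection stage: first fmt with a truthy url and rank i
def pvStage (i : Int) (L : List (List (String × String))) : Option (List (String × String)) :=
  L.find? (fun f => pvTruthy f && (pvRank f == i))

-- stages 0..n-1 chained low-rank-first
def pvChain (L : List (List (String × String))) : Nat → Option ((List (String × String)) × Int)
  | 0 => none
  | n+1 => (pvChain L n).orElse (fun _ => (pvStage (n : Int) L).map (fun f => (f, (n : Int))))

lemma pvRank_nonneg (f : List (String × String)) : 0 ≤ pvRank f := by
  unfold pvRank pvRankTbl
  cases h : pvFGet f "ext" with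
  | none => simp
  | some e =>
    simp only [PySem.Dict.get?_mk_cons]
    split_ifs <;> simp [PySem.Dict.get?]

lemma pvRank_le_five (f : List (String × String)) : pvRank f ≤ 5 := by
  unfold pvRank pvRankTbl
  cases h : pvFGet f "ext" with
  | none => simp
  | some e =>
    simp only [PySem.Dict.get?_mk_cons]
    split_ifs <;> simp [PySem.Dict.get?]

lemma pvStage_cons (i : Int) (f : List (String × String)) (L : List (List (String × String))) :
    pvStage i (f :: L) = if (pvTruthy f && (pvRank f == i)) = true then some f else pvStage i L := by
  simp only [pvStage, List.find?_cons]
  cases (pvTruthy f && pvRank f == i) <;> simp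

lemma pred_pref (f : List (String × String)) :
    (((pvFGet f "ext" == some "json3") && pvTruthy f) = (pvTruthy f && (pvRank f == (0 : Int)))) ∧
    (((pvFGet f "ext" == some "vtt") && pvTruthy f) = (pvTruthy f && (pvRank f == (1 : Int)))) ∧
    (((pvFGet f "ext" == some "srv3") && pvTruthy f) = (pvTruthy f && (pvRank f == (2 : Int)))) ∧
    (((pvFGet f "ext" == some "srv2") && pvTruthy f) = (pvTruthy f && (pvRank f == (3 : Int)))) ∧
    (((pvFGet f "ext" == some "srv1") && pvTruthy f) = (pvTruthy f && (pvRank f == (4 : Int)))) := by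
  unfold pvRank pvRankTbl
  cases h : pvFGet f "ext" with
  | none => simp
  | some e =>
    simp only [PySem.Dict.get?_mk_cons]
    split_ifs with h1 h2 h3 h4 h5
    · have he : e = "json3" := (beq_iff_eq.mp h1).symm
      subst he; cases pvTruthy f <;> simp
    · have he : e = "vtt" := (beq_iff_eq.mp h2).symm
      subst he; cases pvTruthy f <;> simp
    · have he : e = "srv3" := (beq_iff_eq.mp h3).symm
      subst he; cases pvTruthy f <;> simp
    · have he : e = "srv2" := (beq_iff_eq.mp h4).symm
      subst he; cases pvTruthy f <;> simp
    · have he : e = "srv1" := (beq_iff_eq.mp h5).symm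
      subst he; cases pvTruthy f <;> simp
    · have n1 : e ≠ "json3" := fun he => h1 (by rw [he]; exact beq_self_eq_true _)
      have n2 : e ≠ "vtt" := fun he => h2 (by rw [he]; exact beq_self_eq_true _)
      have n3 : e ≠ "srv3" := fun he => h3 (by rw [he]; exact beq_self_eq_true _)
      have n4 : e ≠ "srv2" := fun he => h4 (by rw [he]; exact beq_self_eq_true _)
      have n5 : e ≠ "srv1" := fun he => h5 (by rw [he]; exact beq_self_eq_true _)
      cases pvTruthy f <;> simp [PySem.Dict.get?, n1, n2, n3, n4, n5]

lemma pvChain_nil (n : Nat) : pvChain [] n = none := by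
  induction n with
  | zero => rfl
  | succ n ih => simp [pvChain, ih, pvStage, Option.orElse]

lemma pvChain_cons_skip (f : List (String × String)) (L : List (List (String × String))) :
    ∀ n : Nat, (∀ i : Nat, i < n → (pvTruthy f && (pvRank f == (i : Int))) = false) →
    pvChain (f :: L) n = pvChain L n := by
  intro n
  induction n with
  | zero => intro _; rfl
  | succ n ih =>
    intro h
    simp only [pvChain, ih (fun i hi => h i (Nat.lt_succ_of_lt hi)), pvStage_cons,
      h n (Nat.lt_succ_self n), if_false, Bool.false_eq_true]

lemma pvChain_cons_hit (f : List (String × String)) (L : List (List (String × String))) (m : Nat)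
    (ht : pvTruthy f = true) (hm : pvRank f = (m : Int)) :
    ∀ n : Nat, m < n →
    pvChain (f :: L) n = (pvChain L m).orElse (fun _ => some (f, (m : Int))) := by
  intro n
  induction n with
  | zero => intro h; omega
  | succ n ih =>
    intro hmn
    rcases Nat.lt_succ_iff_lt_or_eq.mp hmn with hlt | heq
    · rw [show pvChain (f :: L) (n + 1) =
          (pvChain (f :: L) n).orElse
            (fun _ => (pvStage (n : Int) (f :: L)).map (fun g => (g, (n : Int)))) from rfl,
        ih hlt]
      cases hc : pvChain L m <;> simp [Option.orElse]
    · subst heq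
      rw [show pvChain (f :: L) (m + 1) =
          (pvChain (f :: L) m).orElse
            (fun _ => (pvStage (m : Int) (f :: L)).map (fun g => (g, (m : Int)))) from rfl,
        pvChain_cons_skip f L m (by
          intro i hi
          have : pvRank f ≠ (i : Int) := by omega
          simp [this]),
        pvStage_cons, if_pos (by simp [ht, hm])]
      cases hc : pvChain L m <;> simp [Option.orElse]

lemma pvFold_chain (L : List (List (String × String))) :
    ∀ (o : Option (List (String × String))) (n : Nat),
    L.foldl (fun st f =>
        if !pvTruthy f then st
        else if pvRank f < st.2 then (some f, pvRank f) else st) (o, (n : Int)) =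
      (match pvChain L n with
       | some (g, i) => (some g, i)
       | none => (o, (n : Int))) := by
  induction L with
  | nil => intro o n; simp [pvChain_nil]
  | cons f L ih =>
    intro o n
    rw [List.foldl_cons]
    by_cases ht : pvTruthy f = true
    · simp only [ht, Bool.not_true, Bool.false_eq_true, if_false]
      by_cases hlt : pvRank f < (n : Int)
      · have hnn := pvRank_nonneg f
        set m := (pvRank f).toNat with hmdef
        have hm : pvRank f = (m : Int) := by omega
        have hmn : m < n := by omega
        rw [if_pos hlt, hm, ih (some f) m, pvChain_cons_hit f L m ht hm n hmn]
        cases hc : pvChain L m <;> simp [Option.orElse]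
      · rw [if_neg hlt, ih o n, pvChain_cons_skip f L n (by
          intro i hi
          have : pvRank f ≠ (i : Int) := by omega
          simp [this])]
    · simp only [Bool.not_eq_true] at ht
      simp only [ht, Bool.not_false, if_true]
      rw [ih o n, pvChain_cons_skip f L n (by intro i hi; simp [ht])]

lemma pick_alt_eq_chain (L : List (List (String × String))) :
    pick_best_fmt_alt L = Option.map Prod.fst (pvChain L 6) := by
  unfold pick_best_fmt_alt
  rw [show (6 : Int) = ((6 : Nat) : Int) from rfl, pvFold_chain L none 6]
  cases hc : pvChain L 6 with
  | none => rfl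
  | some p => cases p; rfl

lemma pvChain_truthy (L : List (List (String × String))) :
    ∀ (n : Nat) (g : List (String × String)) (i : Int),
    pvChain L n = some (g, i) → pvTruthy g = true := by
  intro n
  induction n with
  | zero => intro g i h; simp [pvChain] at h
  | succ n ih =>
    intro g i h
    rw [show pvChain L (n + 1) =
        (pvChain L n).orElse (fun _ => (pvStage (n : Int) L).map (fun f => (f, (n : Int)))) from rfl] at h
    cases hc : pvChain L n with
    | some p =>
      cases p with
      | mk a b =>
        rw [hc] at h
        simp [Option.orElse] at h
        exact h.1 ▸ ih a b hc
    | none =>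
      rw [hc] at h; simp [Option.orElse] at h
      cases hs : pvStage (n : Int) L with
      | none => rw [hs] at h; simp at h
      | some f =>
        rw [hs] at h; simp at h
        have hf := List.find?_some hs
        simp at hf
        rw [← h.1]; exact hf.1

lemma find?_congr_mem {α : Type} (p q : α → Bool) :
    ∀ l : List α, (∀ x ∈ l, p x = q x) → l.find? p = l.find? q := by
  intro l
  induction l with
  | nil => intro _; rfl
  | cons x l ih =>
    intro h
    rw [List.find?_cons, List.find?_cons, h x (List.mem_cons_self),
      ih (fun y hy => h y (List.mem_cons_of_mem x hy))]

lemma chain_fst (L : List (List (String × String))) (n : Nat) :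
    Option.map Prod.fst (pvChain L (n + 1)) =
      (Option.map Prod.fst (pvChain L n)).orElse (fun _ => pvStage (n : Int) L) := by
  rw [show pvChain L (n + 1) =
      (pvChain L n).orElse (fun _ => (pvStage (n : Int) L).map (fun f => (f, (n : Int)))) from rfl]
  cases pvChain L n <;> cases hs : pvStage (n : Int) L <;> simp [Option.orElse]

lemma pick_A_eq_chain (L : List (List (String × String))) :
    pick_best_fmt L = Option.map Prod.fst (pvChain L 6) := by
  cases L with
  | nil => simp [pick_best_fmt, pvChain_nil]
  | cons f0 T =>
    rw [show (6 : Nat) = 5 + 1 from rfl, chain_fst, show (5 : Nat) = 4 + 1 from rfl, chain_fst,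
      show (4 : Nat) = 3 + 1 from rfl, chain_fst, show (3 : Nat) = 2 + 1 from rfl, chain_fst,
      show (2 : Nat) = 1 + 1 from rfl, chain_fst, show (1 : Nat) = 0 + 1 from rfl, chain_fst]
    simp only [pvChain, Option.map_none]
    unfold pick_best_fmt
    rw [if_neg (by simp)]
    simp only [List.findSome?_cons, List.findSome?_nil]
    have hp := fun g => pred_pref g
    simp only [pvStage]
    rw [show (((0 : Nat) : Int)) = (0 : Int) from rfl, show (((1 : Nat) : Int)) = (1 : Int) from rfl,
      show (((2 : Nat) : Int)) = (2 : Int) from rfl, show (((3 : Nat) : Int)) = (3 : Int) from rfl,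
      show (((4 : Nat) : Int)) = (4 : Int) from rfl, show (((5 : Nat) : Int)) = (5 : Int) from rfl]
    rw [find?_congr_mem _ _ (f0 :: T) (fun g _ => (hp g).1),
      find?_congr_mem _ _ (f0 :: T) (fun g _ => (hp g).2.1),
      find?_congr_mem _ _ (f0 :: T) (fun g _ => (hp g).2.2.1),
      find?_congr_mem _ _ (f0 :: T) (fun g _ => (hp g).2.2.2.1),
      find?_congr_mem _ _ (f0 :: T) (fun g _ => (hp g).2.2.2.2)]
    cases h0 : (f0 :: T).find? (fun f => pvTruthy f && (pvRank f == (0 : Int))) <;>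
      [skip; simp [Option.orElse]]
    cases h1 : (f0 :: T).find? (fun f => pvTruthy f && (pvRank f == (1 : Int))) <;>
      [skip; simp [Option.orElse]]
    cases h2 : (f0 :: T).find? (fun f => pvTruthy f && (pvRank f == (2 : Int))) <;>
      [skip; simp [Option.orElse]]
    cases h3 : (f0 :: T).find? (fun f => pvTruthy f && (pvRank f == (3 : Int))) <;>
      [skip; simp [Option.orElse]]
    cases h4 : (f0 :: T).find? (fun f => pvTruthy f && (pvRank f == (4 : Int))) <;>
      [skip; simp [Option.orElse]]
    simp only [Option.orElse]
    exact find?_congr_mem _ _ (f0 :: T) (by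
      intro g hg
      by_cases ht : pvTruthy g = true
      · have b0 := List.find?_eq_none.mp h0 g hg
        have b1 := List.find?_eq_none.mp h1 g hg
        have b2 := List.find?_eq_none.mp h2 g hg
        have b3 := List.find?_eq_none.mp h3 g hg
        have b4 := List.find?_eq_none.mp h4 g hg
        simp [ht] at b0 b1 b2 b3 b4
        have h5 : pvRank g = 5 := by
          have := pvRank_nonneg g
          have := pvRank_le_five g
          omega
        simp [ht, h5]
      · simp only [Bool.not_eq_true] at ht
        simp [ht])

lemma pick_eq (L : List (List (String × String))) : pick_best_fmt L = pick_best_fmt_alt L := by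
  rw [pick_A_eq_chain, pick_alt_eq_chain]

lemma pick_alt_truthy (L : List (List (String × String))) (e : List (String × String))
    (h : pick_best_fmt_alt L = some e) : pvTruthy e = true := by
  rw [pick_alt_eq_chain] at h
  cases hc : pvChain L 6 with
  | none => rw [hc] at h; simp at h
  | some p =>
    cases p with
    | mk a b =>
      rw [hc] at h
      simp at h
      exact h ▸ pvChain_truthy L 6 a b hc
lemma truthy_not_nil (e : List (String × String)) (h : pvTruthy e = true) : e.isEmpty = false := by
  cases e with
  | nil => exact absurd h (by decide)
  | cons a l => rfl

-- proof-side names for the two loop bodies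
def pvStepA (kind : String) (cap : PySem.Dict String (List (String × String)))
    (p : String × List (List (String × String))) : PySem.Dict String (List (String × String)) :=
  match pick_best_fmt p.2 with
  | some entry => if !entry.isEmpty && pvTruthy entry then cap.insert p.1 (pvCapEntry kind entry) else cap
  | none => cap

def pvStepB (kind : String) (cap : PySem.Dict String (List (String × String)))
    (p : String × List (List (String × String))) : PySem.Dict String (List (String × String)) :=
  if cap.contains p.1 then cap
  else match pick_best_fmt_alt p.2 with
    | some entry => cap.insert p.1 (pvCapEntry kind entry)
    | none => cap

lemma stepA_body (kind : String) (cap : PySem.Dict String (List (String × String)))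
    (p : String × List (List (String × String))) :
    pvStepA kind cap p =
      (match pick_best_fmt_alt p.2 with
       | some entry => cap.insert p.1 (pvCapEntry kind entry)
       | none => cap) := by
  unfold pvStepA
  rw [pick_eq]
  cases h : pick_best_fmt_alt p.2 with
  | none => rfl
  | some entry =>
    have ht := pick_alt_truthy p.2 entry h
    simp [ht, truthy_not_nil entry ht]

lemma stepB_of_not_contains (kind : String) (cap : PySem.Dict String (List (String × String)))
    (p : String × List (List (String × String))) (h : cap.contains p.1 = false) :
    pvStepB kind cap p = pvStepA kind cap p := by
  rw [stepA_body]; unfold pvStepB; simp [h]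

lemma contains_stepA (kind : String) (cap : PySem.Dict String (List (String × String)))
    (p : String × List (List (String × String))) (l : String) (hne : l ≠ p.1)
    (h : cap.contains l = false) : (pvStepA kind cap p).contains l = false := by
  unfold pvStepA
  cases pick_best_fmt p.2 with
  | none => exact h
  | some entry =>
    by_cases hc : (!entry.isEmpty && pvTruthy entry) = true
    · simp [hc, PySem.Dict.contains_insert, h, hne]
    · simp only [Bool.not_eq_true] at hc
      simp [hc, h]

lemma manual_fold_eq :
    ∀ (m : List (String × List (List (String × String)))) (cap : PySem.Dict String (List (String × String))),
    (m.map Prod.fst).Nodup → (∀ l ∈ m.map Prod.fst, cap.contains l = false) →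
    m.foldl (pvStepA "manual") cap = m.foldl (pvStepB "manual") cap := by
  intro m
  induction m with
  | nil => intro _ _ _; rfl
  | cons p m ih =>
    intro cap hnd hc
    simp only [List.map_cons, List.nodup_cons] at hnd
    rw [List.foldl_cons, List.foldl_cons,
      stepB_of_not_contains "manual" cap p (hc p.1 (by simp))]
    exact ih (pvStepA "manual" cap p) hnd.2 (fun l hl =>
      contains_stepA "manual" cap p l (fun he => hnd.1 (he ▸ hl)) (hc l (by simp [hl])))

lemma auto_step_eq :
    (fun (cap : PySem.Dict String (List (String × String))) (p : String × List (List (String × String))) =>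
      if cap.contains p.1 then cap else pvStepA "auto" cap p) = pvStepB "auto" := by
  funext cap p
  by_cases h : cap.contains p.1 = true
  · simp [pvStepB, h]
  · simp only [Bool.not_eq_true] at h
    simp [h, stepB_of_not_contains "auto" cap p h]

-- ===== VERDICT (by name: the statement is the Claim_ definition above) =====
theorem build_caption_map_py_spec : Claim_equal_build_caption_map_py := by
  intro info _hdom hpre
  unfold Spec_build_caption_map_py
  have hA : build_caption_map_py info =
      ((((PySem.Dict.mk info).get? "automatic_captions").getD []).foldl
        (fun cap p => if cap.contains p.1 then cap else pvStepA "auto" cap p)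
        ((((PySem.Dict.mk info).get? "subtitles").getD []).foldl (pvStepA "manual")
          PySem.Dict.empty)).items := rfl
  have hB : build_caption_map_py_alt info =
      ((((PySem.Dict.mk info).get? "automatic_captions").getD []).foldl (pvStepB "auto")
        ((((PySem.Dict.mk info).get? "subtitles").getD []).foldl (pvStepB "manual")
          PySem.Dict.empty)).items := rfl
  rw [hA, hB, auto_step_eq,
    manual_fold_eq _ PySem.Dict.empty hpre (fun l _ => by simp [PySem.Dict.contains_empty])]
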